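-- pv_equiv track=rewrite | github.com/GeekCSA/Data-Compression | Data_Compression.py | find_self_dangling_suffix
-- ===== SOURCE A (Python) =====
-- def find_self_dangling_suffix(S, T, same):
--     s = set()
--
--     if same == 1:
--         if len(T) != set(T).__len__():
--             s.add("2")  # 2 as epsilon
--         S = T = set(T)
--
--     for current in S:
--         for word in T:
--             if word.find(current) == 0 and current != word:
--                 index_finish_prefix = word.find(current) + len(current)
--                 dangling_suffix = word[index_finish_prefix:]
--                 if dangling_suffix == "":
--                     s.add('2')
--                 s.add(dangling_suffix)
--     return s
-- ===== SOURCE B (Python) =====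
-- def find_self_dangling_suffix(S, T, same):
--     s = set()
--     if same == 1:
--         if len(T) != len(set(T)):
--             s.add("2")  # 2 as epsilon
--         S = T = set(T)
--     # index every proper prefix of every word to the dangling suffix it leaves
--     index = {}
--     for word in T:
--         for k in range(len(word)):
--             index.setdefault(word[:k], []).append(word[k:])
--     for current in S:
--         for suffix in index.get(current, []):
--             s.add(suffix)
--     return s
-- ===== Notes on version B (the rewrite author's own statement) =====
-- stated objective: faster
-- what changed: Instead of scanning all of T for every element of S (testing word.find(current)==0 each time), B builds a dict from every proper prefix of every word of T to its list of dangling suffixes once, then answers each current by a single dict lookup.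
import Mathlib
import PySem

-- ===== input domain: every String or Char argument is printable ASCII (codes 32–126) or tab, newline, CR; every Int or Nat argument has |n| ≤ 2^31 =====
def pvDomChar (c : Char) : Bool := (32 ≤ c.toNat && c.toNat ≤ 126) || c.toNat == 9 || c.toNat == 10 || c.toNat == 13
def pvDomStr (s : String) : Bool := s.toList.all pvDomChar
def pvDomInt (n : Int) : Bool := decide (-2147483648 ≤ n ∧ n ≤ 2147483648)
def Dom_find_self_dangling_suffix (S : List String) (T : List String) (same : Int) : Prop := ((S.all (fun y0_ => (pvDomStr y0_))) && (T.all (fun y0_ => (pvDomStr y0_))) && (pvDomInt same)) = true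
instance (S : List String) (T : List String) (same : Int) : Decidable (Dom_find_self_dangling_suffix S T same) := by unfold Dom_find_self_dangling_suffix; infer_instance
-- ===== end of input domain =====

-- B replaces A's scan of all of T for every current by a prefix→suffixes index built once from T (objective: faster on many queries).
-- ===== PORT A =====
-- the double loop of A, factored out (Python reuses the same loop after the same==1 reassignment)
def pvLoopA (s : PySem.Set String) (S T : List String) : List String :=
  S.foldl (fun s current =>
    T.foldl (fun s word =>
      if PySem.Str.find word current == 0 && current != word then
        let index_finish_prefix := PySem.Str.find word current + PySem.Str.len current
        let dangling_suffix := PySem.Str.slice word (some index_finish_prefix) none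
        let s := if dangling_suffix == "" then PySem.Set.add s "2" else s
        PySem.Set.add s dangling_suffix
      else s) s) s

def find_self_dangling_suffix (S : List String) (T : List String) (same : Int) : List String :=
  let s : PySem.Set String := PySem.Set.empty
  if same == 1 then
    let s := if PySem.List.len T != PySem.Set.len (PySem.Set.ofList T) then PySem.Set.add s "2" else s
    let S' : List String := PySem.Set.ofList T
    let T' : List String := PySem.Set.ofList T
    pvLoopA s S' T'
  else
    pvLoopA s S T

-- ===== PORT B =====
-- B's loops: build a dict mapping every proper prefix of a word of T to the list of dangling suffixes, then look each current up
def pvLoopB (s : PySem.Set String) (S T : List String) : List String :=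
  let index : PySem.Dict String (List String) :=
    T.foldl (fun index word =>
      (PySem.List.pyRange 0 (PySem.Str.len word) 1).foldl
        (fun index k => index.modify (PySem.Str.slice word none (some k)) []
          (fun l => l ++ [PySem.Str.slice word (some k) none])) index)
      PySem.Dict.empty
  S.foldl (fun s current =>
    (index.getD current []).foldl (fun s suffix => PySem.Set.add s suffix) s) s

def find_self_dangling_suffix_alt (S : List String) (T : List String) (same : Int) : List String :=
  let s : PySem.Set String := PySem.Set.empty
  if same == 1 then
    let s := if PySem.List.len T != PySem.Set.len (PySem.Set.ofList T) then PySem.Set.add s "2" else s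
    let S' : List String := PySem.Set.ofList T
    let T' : List String := PySem.Set.ofList T
    pvLoopB s S' T'
  else
    pvLoopB s S T

-- ===== PRECONDITION & SPEC =====
def Spec_find_self_dangling_suffix (S : List String) (T : List String) (same : Int) (out : List String) : Prop := out = find_self_dangling_suffix_alt S T same
instance (S : List String) (T : List String) (same : Int) (out : List String) : Decidable (Spec_find_self_dangling_suffix S T same out) := by unfold Spec_find_self_dangling_suffix; infer_instance

-- ===== CLAIM (what is proved, stated in full; the proofs are below) =====
def Claim_equal_find_self_dangling_suffix : Prop := ∀ (S : List String) (T : List String) (same : Int), Dom_find_self_dangling_suffix S T same → Spec_find_self_dangling_suffix S T same (find_self_dangling_suffix S T same)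

-- ===== LEMMAS AND PROOFS =====
def pvMatch (c w : String) : Bool := PySem.Str.find w c == 0 && c != w
def pvEl (c w : String) : String := PySem.Str.slice w (some ((c.toList.length : Int))) none
def pvSufs (T : List String) (c : String) : List String :=
  (T.filter (fun w => pvMatch c w)).map (fun w => pvEl c w)

lemma pvString_toList_inj {s t : String} (h : s.toList = t.toList) : s = t :=
  String.toList_inj.mp h

lemma pvMatch_iff (c w : String) :
    pvMatch c w = true ↔ (c.toList <+: w.toList ∧ c.toList.length < w.toList.length) := by
  unfold pvMatch
  simp only [Bool.and_eq_true, beq_iff_eq, bne_iff_ne]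
  constructor
  · rintro ⟨hf, hne⟩
    have h0 : (0 : Int) ≤ PySem.Str.find w c := by omega
    rw [PySem.Str.find_eq] at hf h0
    have hsp := PySem.Chars.find_spec h0
    rw [hf] at hsp
    have hpre : c.toList <+: w.toList := by simpa using hsp.1
    refine ⟨hpre, ?_⟩
    have hle := hpre.length_le
    rcases Nat.lt_or_ge c.toList.length w.toList.length with h | h
    · exact h
    · exact absurd (pvString_toList_inj (List.IsPrefix.eq_of_length_le hpre (by omega))) hne
  · rintro ⟨hpre, hlt⟩
    have hne : c ≠ w := by
      intro h; subst h; omega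
    refine ⟨?_, hne⟩
    rw [PySem.Str.find_eq]
    have h0 : (0 : Int) ≤ PySem.Chars.find w.toList c.toList := by
      rw [PySem.Chars.find_nonneg_iff]
      exact hpre.isInfix
    have hsp := PySem.Chars.find_spec h0
    by_contra hne0
    have hpos : 0 < (PySem.Chars.find w.toList c.toList).toNat := by omega
    exact hsp.2 0 hpos (by simpa using hpre)

lemma pvEl_toList (c w : String) : (pvEl c w).toList = w.toList.drop c.toList.length := by
  unfold pvEl
  rw [PySem.Str.toList_slice, PySem.Chars.slice_eq_listSlice, PySem.List.slice_from_natCast]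

lemma pvEl_ne_empty {c w : String} (h : pvMatch c w = true) : pvEl c w ≠ "" := by
  rw [pvMatch_iff] at h
  intro he
  have : (pvEl c w).toList = [] := by rw [he]; rfl
  rw [pvEl_toList, List.drop_eq_nil_iff] at this
  omega

lemma pvA_body (c w : String) (s : PySem.Set String) :
    (if PySem.Str.find w c == 0 && c != w then
      let index_finish_prefix := PySem.Str.find w c + PySem.Str.len c
      let dangling_suffix := PySem.Str.slice w (some index_finish_prefix) none
      let s := if dangling_suffix == "" then PySem.Set.add s "2" else s
      PySem.Set.add s dangling_suffix
    else s)
    = if pvMatch c w then PySem.Set.add s (pvEl c w) else s := by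
  by_cases h : (PySem.Str.find w c == 0 && c != w) = true
  · have hf : PySem.Str.find w c = 0 := by
      rcases Bool.and_eq_true .. |>.mp h with ⟨h1, _⟩
      exact beq_iff_eq.mp h1
    have hds : PySem.Str.slice w (some (PySem.Str.find w c + PySem.Str.len c)) none = pvEl c w := by
      rw [hf, PySem.Str.len_eq, zero_add]; rfl
    have hm : pvMatch c w = true := h
    have hne : (pvEl c w == "") = false := by
      simpa using pvEl_ne_empty hm
    simp only [h, if_true, hm, hds, hne, Bool.false_eq_true, if_false]
  · have hm : pvMatch c w = false := by simpa [pvMatch] using h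
    simp only [h, hm, if_false, Bool.false_eq_true]

lemma pvSufs_cons (w : String) (T : List String) (c : String) :
    pvSufs (w :: T) c = (if pvMatch c w then [pvEl c w] else []) ++ pvSufs T c := by
  unfold pvSufs
  by_cases h : pvMatch c w <;> simp [h]

lemma pvA_inner (c : String) (T : List String) (s : PySem.Set String) :
    T.foldl (fun s word =>
      if PySem.Str.find word c == 0 && c != word then
        let index_finish_prefix := PySem.Str.find word c + PySem.Str.len c
        let dangling_suffix := PySem.Str.slice word (some index_finish_prefix) none
        let s := if dangling_suffix == "" then PySem.Set.add s "2" else s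
        PySem.Set.add s dangling_suffix
      else s) s
    = (pvSufs T c).foldl PySem.Set.add s := by
  rw [PySem.List.foldl_congr_mem _ _ (fun s word => if pvMatch c word then PySem.Set.add s (pvEl c word) else s) _
      (fun acc x _ => pvA_body c x acc)]
  rw [PySem.List.foldl_if_eq_foldl_filter]
  unfold pvSufs
  rw [List.foldl_map]

-- key of the index for prefix length k
lemma pvKey_toList (w : String) (k : Nat) :
    (PySem.Str.slice w none (some (k : Int))).toList = w.toList.take k := by
  rw [PySem.Str.toList_slice, PySem.Chars.slice_eq_listSlice, PySem.List.slice_to_natCast]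

lemma pvB_word_aux (w c : String) :
    ∀ (n : Nat), n ≤ w.toList.length → ∀ (d : PySem.Dict String (List String)),
    ((List.range n).foldl (fun index (k : Nat) =>
        index.modify (PySem.Str.slice w none (some (k : Int))) []
          (fun l => l ++ [PySem.Str.slice w (some (k : Int)) none])) d).getD c []
    = d.getD c [] ++ (if c.toList <+: w.toList ∧ c.toList.length < n then [pvEl c w] else []) := by
  intro n
  induction n with
  | zero => intro _ d; simp
  | succ n ih =>
    intro hn d
    rw [List.range_succ, List.foldl_append, List.foldl_cons, List.foldl_nil]
    by_cases hc : c = PySem.Str.slice w none (some (n : Int))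
    · have hlen : c.toList.length = n := by
        rw [hc, pvKey_toList, List.length_take]; omega
      have hpre : c.toList <+: w.toList := by
        rw [hc, pvKey_toList]; exact List.take_prefix n w.toList
      rw [← hc, PySem.Dict.getD_modify_self, ih (by omega) d]
      have hfalse : ¬ (c.toList <+: w.toList ∧ c.toList.length < n) := by
        rintro ⟨_, h⟩; omega
      rw [if_neg hfalse, if_pos ⟨hpre, by omega⟩]
      have hel : pvEl c w = PySem.Str.slice w (some (n : Int)) none := by
        unfold pvEl; rw [hlen]
      rw [hel]
      simp
    · rw [PySem.Dict.getD_modify_of_ne _ _ _ hc, ih (by omega) d]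
      congr 1
      by_cases hp : c.toList <+: w.toList
      · by_cases hl : c.toList.length < n
        · rw [if_pos ⟨hp, hl⟩, if_pos ⟨hp, by omega⟩]
        · have hnn : ¬ (c.toList.length < n + 1) := by
            intro hlt
            have hlen : c.toList.length = n := by omega
            apply hc
            apply pvString_toList_inj
            rw [pvKey_toList, ← hlen]
            exact List.prefix_iff_eq_take.mp hp
          rw [if_neg (fun hh => hl hh.2), if_neg (fun hh => hnn hh.2)]
      · rw [if_neg (by rintro ⟨h, _⟩; exact hp h), if_neg (by rintro ⟨h, _⟩; exact hp h)]

lemma pvB_word (d : PySem.Dict String (List String)) (w c : String) :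
    ((PySem.List.pyRange 0 (PySem.Str.len w) 1).foldl
      (fun index k => index.modify (PySem.Str.slice w none (some k)) []
        (fun l => l ++ [PySem.Str.slice w (some k) none])) d).getD c []
    = d.getD c [] ++ (if pvMatch c w then [pvEl c w] else []) := by
  rw [PySem.Str.len_eq, PySem.List.pyRange_zero_nat, List.foldl_map,
      pvB_word_aux w c w.toList.length (le_refl _) d]
  congr 1
  by_cases h : pvMatch c w
  · rw [if_pos h, if_pos ((pvMatch_iff c w).mp h)]
  · rw [if_neg h, if_neg (fun hh => h ((pvMatch_iff c w).mpr hh))]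

lemma pvB_index (T : List String) (d : PySem.Dict String (List String)) (c : String) :
    (T.foldl (fun index word =>
      (PySem.List.pyRange 0 (PySem.Str.len word) 1).foldl
        (fun index k => index.modify (PySem.Str.slice word none (some k)) []
          (fun l => l ++ [PySem.Str.slice word (some k) none])) index) d).getD c []
    = d.getD c [] ++ pvSufs T c := by
  induction T generalizing d with
  | nil => simp [pvSufs]
  | cons w T ih =>
    rw [List.foldl_cons, ih, pvB_word, pvSufs_cons, List.append_assoc]

lemma pvLoop_eq (s : PySem.Set String) (S T : List String) : pvLoopA s S T = pvLoopB s S T := by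
  unfold pvLoopA pvLoopB
  apply PySem.List.foldl_congr_mem
  intro acc c _
  rw [pvA_inner c T acc, pvB_index T PySem.Dict.empty c]
  have hemp : (PySem.Dict.empty : PySem.Dict String (List String)).getD c [] = [] := rfl
  rw [hemp, List.nil_append]

-- ===== VERDICT (by name: the statement is the Claim_ definition above) =====
theorem find_self_dangling_suffix_spec : Claim_equal_find_self_dangling_suffix := by
  intro S T same _
  unfold Spec_find_self_dangling_suffix
  unfold find_self_dangling_suffix find_self_dangling_suffix_alt
  by_cases h : (same == 1) = true
  · simp only [h, if_true, pvLoop_eq]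
  · simp only [h, if_false, Bool.false_eq_true, pvLoop_eq]
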